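-- pv_equiv track=rewrite | github.com/AlexLee1109/Akane | app/coding_agent.py | _prepare_editor_actions
-- ===== SOURCE A (Python) =====
-- _ACTIVE_EDITOR_COMMANDS = {"replace_selection", "insert_text", "format_document", "save_file"}
--
-- def _explicit_action_target_path(action: dict) -> str:
--     command = str(action.get("command") or "").lower()
--     argument = str(action.get("argument") or "")
--     if command in {"read_file", "open_file"}:
--         return argument.split(":", 1)[0].strip()
--     if command == "create_file":
--         return argument.strip()
--     if command in {"write_file", "append_file"}:
--         return argument.split("\n", 1)[0].strip()
--     if command == "replace_file_range":
--         return argument.split("\n", 1)[0].split(":", 1)[0].strip()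
--     if command == "save_file":
--         return argument.strip()
--     return ""
--
-- def _prepare_editor_actions(actions: list[dict], active_file: str) -> list[dict]:
--     queued = list(actions)
--     needs_active_editor = any(str(action.get("command") or "").lower() in _ACTIVE_EDITOR_COMMANDS for action in queued)
--     preferred_path = ""
--     for action in queued:
--         preferred_path = _explicit_action_target_path(action)
--         if preferred_path:
--             break
--     if not preferred_path:
--         preferred_path = active_file
--
--     if (
--         needs_active_editor
--         and preferred_path
--         and preferred_path != active_file
--         and not any(
--             str(action.get("command") or "").lower() == "open_file"
--             and str(action.get("argument") or "").split(":", 1)[0].strip() == preferred_path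
--             for action in queued
--         )
--     ):
--         queued = [{"command": "open_file", "argument": preferred_path}, *queued]
--     return queued
-- ===== SOURCE B (Python) =====
-- _ACTIVE_EDITOR_COMMANDS = {"replace_selection", "insert_text", "format_document", "save_file"}
--
-- def _explicit_action_target_path(action: dict) -> str:
--     command = str(action.get("command") or "").lower()
--     argument = str(action.get("argument") or "")
--     if command in {"read_file", "open_file"}:
--         return argument.split(":", 1)[0].strip()
--     if command == "create_file":
--         return argument.strip()
--     if command in {"write_file", "append_file"}:
--         return argument.split("\n", 1)[0].strip()
--     if command == "replace_file_range":
--         return argument.split("\n", 1)[0].split(":", 1)[0].strip()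
--     if command == "save_file":
--         return argument.strip()
--     return ""
--
-- def _prepare_editor_actions(actions: list, active_file: str) -> list:
--     # Single pass: gather everything the decision needs in one loop.
--     needs_active_editor = False
--     first_path = None
--     open_targets = set()
--     for action in actions:
--         command = str(action.get("command") or "").lower()
--         if command in _ACTIVE_EDITOR_COMMANDS:
--             needs_active_editor = True
--         if first_path is None:
--             path = _explicit_action_target_path(action)
--             if path:
--                 first_path = path
--         if command == "open_file":
--             open_targets.add(str(action.get("argument") or "").split(":", 1)[0].strip())
--     preferred_path = active_file if first_path is None else first_path
--     if (
--         needs_active_editor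
--         and preferred_path
--         and preferred_path != active_file
--         and preferred_path not in open_targets
--     ):
--         return [{"command": "open_file", "argument": preferred_path}, *actions]
--     return actions
-- ===== Notes on version B (the rewrite author's own statement) =====
-- stated objective: alternative
-- what changed: Replaces A's three separate scans of the action list (any() for editor commands, a break-loop for the first explicit target, any() for an existing open_file) with one accumulating pass that tracks a needs flag, the first explicit target, and a set of open_file targets, then decides the prepend from those; measured cost is the same.
import Mathlib
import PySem

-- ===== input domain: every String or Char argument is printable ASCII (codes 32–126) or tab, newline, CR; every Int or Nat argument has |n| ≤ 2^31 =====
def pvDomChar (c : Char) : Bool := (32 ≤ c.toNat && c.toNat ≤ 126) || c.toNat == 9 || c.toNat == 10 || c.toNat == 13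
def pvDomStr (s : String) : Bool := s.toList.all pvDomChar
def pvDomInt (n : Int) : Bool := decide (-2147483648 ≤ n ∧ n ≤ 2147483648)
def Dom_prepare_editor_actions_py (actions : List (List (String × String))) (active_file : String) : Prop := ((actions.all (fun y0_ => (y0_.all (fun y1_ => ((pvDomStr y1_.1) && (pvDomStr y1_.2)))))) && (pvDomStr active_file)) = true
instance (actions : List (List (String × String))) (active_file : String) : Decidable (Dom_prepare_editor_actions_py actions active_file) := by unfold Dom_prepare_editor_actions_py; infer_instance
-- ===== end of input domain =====

-- B replaces A's three separate scans of the action list with one accumulating pass over (needs flag, first explicit target, set of open_file targets); same return value, same measured cost.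

-- ===== PORT A =====
-- shared helper: action.get(k) with 'str(… or "")' (missing key and empty value both give "")
def pvGet (a : List (String × String)) (k : String) : String :=
  match a.find? (fun p => p.1 == k) with
  | some p => p.2
  | none => ""

-- shared helper: s.split(sep, 1)[0]  (sep nonempty, so splitMax? is some and nonempty)
def pvHeadSplit (s sep : String) : String :=
  ((PySem.Str.splitMax? s sep 1).getD []).headD ""

-- shared helper: _explicit_action_target_path (identical in A and B)
def explicit_action_target_path (a : List (String × String)) : String :=
  let command := PySem.Str.lower (pvGet a "command")
  let argument := pvGet a "argument"
  if command = "read_file" ∨ command = "open_file" then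
    PySem.Str.strip (pvHeadSplit argument ":")
  else if command = "create_file" then
    PySem.Str.strip argument
  else if command = "write_file" ∨ command = "append_file" then
    PySem.Str.strip (pvHeadSplit argument "\n")
  else if command = "replace_file_range" then
    PySem.Str.strip (pvHeadSplit (pvHeadSplit argument "\n") ":")
  else if command = "save_file" then
    PySem.Str.strip argument
  else ""

-- str(action.get("command") or "").lower() in _ACTIVE_EDITOR_COMMANDS
def needsCmd (a : List (String × String)) : Bool :=
  ["replace_selection", "insert_text", "format_document", "save_file"].contains
    (PySem.Str.lower (pvGet a "command"))

-- str(action.get("argument") or "").split(":", 1)[0].strip()  (the open_file target)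
def openTarget (a : List (String × String)) : String :=
  PySem.Str.strip (pvHeadSplit (pvGet a "argument") ":")

-- A's 'for action in queued: preferred_path = …; if preferred_path: break'
def firstTargetA : List (List (String × String)) → String
  | [] => ""
  | a :: rest =>
    let p := explicit_action_target_path a
    if p ≠ "" then p else firstTargetA rest

def prepare_editor_actions_py (actions : List (List (String × String))) (active_file : String) : List (List (String × String)) :=
  let queued := actions
  let needs_active_editor := queued.any (fun a => needsCmd a)
  let p0 := firstTargetA queued
  let preferred_path := if p0 = "" then active_file else p0
  if needs_active_editor = true ∧ preferred_path ≠ "" ∧ preferred_path ≠ active_file ∧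
      queued.any (fun a =>
        (PySem.Str.lower (pvGet a "command") == "open_file") && (openTarget a == preferred_path)) = false
  then [("command", "open_file"), ("argument", preferred_path)] :: queued
  else queued

-- ===== PORT B =====
-- B's single loop: accumulates (needs_active_editor, first_path, open_targets)
def altScan : List (List (String × String)) → Bool → Option String → PySem.Set String →
    Bool × Option String × PySem.Set String
  | [], needs, first, opens => (needs, first, opens)
  | a :: rest, needs, first, opens =>
    let command := PySem.Str.lower (pvGet a "command")
    let needs' := needs || ["replace_selection", "insert_text", "format_document", "save_file"].contains command
    let first' :=
      match first with
      | some p => some p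
      | none =>
        let path := explicit_action_target_path a
        if path = "" then none else some path
    let opens' := if command = "open_file" then PySem.Set.add opens (openTarget a) else opens
    altScan rest needs' first' opens'

def prepare_editor_actions_py_alt (actions : List (List (String × String))) (active_file : String) : List (List (String × String)) :=
  let st := altScan actions false none PySem.Set.empty
  let preferred_path := st.2.1.getD active_file
  if st.1 = true ∧ preferred_path ≠ "" ∧ preferred_path ≠ active_file ∧
      PySem.Set.contains st.2.2 preferred_path = false
  then [("command", "open_file"), ("argument", preferred_path)] :: actions
  else actions

-- ===== PRECONDITION & SPEC =====
def Spec_prepare_editor_actions_py (actions : List (List (String × String))) (active_file : String) (out : List (List (String × String))) : Prop := out = prepare_editor_actions_py_alt actions active_file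
instance (actions : List (List (String × String))) (active_file : String) (out : List (List (String × String))) : Decidable (Spec_prepare_editor_actions_py actions active_file out) := by unfold Spec_prepare_editor_actions_py; infer_instance

-- ===== CLAIM (what is proved, stated in full; the proofs are below) =====
def Claim_equal_prepare_editor_actions_py : Prop := ∀ (actions : List (List (String × String))) (active_file : String), Dom_prepare_editor_actions_py actions active_file → Spec_prepare_editor_actions_py actions active_file (prepare_editor_actions_py actions active_file)

-- ===== LEMMAS AND PROOFS =====

theorem altScan_needs (l : List (List (String × String))) (n : Bool) (f : Option String) (s : PySem.Set String) :
    (altScan l n f s).1 = (n || l.any (fun a => needsCmd a)) := by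
  induction l generalizing n f s with
  | nil => simp [altScan]
  | cons a rest ih => simp [altScan, ih, needsCmd, Bool.or_assoc]

theorem altScan_first_some (l : List (List (String × String))) (n : Bool) (x : String) (s : PySem.Set String) :
    (altScan l n (some x) s).2.1 = some x := by
  induction l generalizing n s with
  | nil => rfl
  | cons a rest ih => simp [altScan, ih]

theorem altScan_first_none (l : List (List (String × String))) (n : Bool) (s : PySem.Set String) :
    (altScan l n none s).2.1 = (if firstTargetA l = "" then none else some (firstTargetA l)) := by
  induction l generalizing n s with
  | nil => rfl
  | cons a rest ih =>
    simp only [altScan, firstTargetA]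
    by_cases h : explicit_action_target_path a = ""
    · simp [h, ih]
    · simp [h, altScan_first_some]

theorem altScan_opens_mem (l : List (List (String × String))) (n : Bool) (f : Option String) (s : PySem.Set String) (y : String) :
    (y ∈ (altScan l n f s).2.2) ↔
      (y ∈ s ∨ l.any (fun a =>
        (PySem.Str.lower (pvGet a "command") == "open_file") && (openTarget a == y)) = true) := by
  induction l generalizing n f s with
  | nil => simp [altScan]
  | cons a rest ih =>
    simp only [altScan, List.any_cons, Bool.or_eq_true]
    by_cases h : PySem.Str.lower (pvGet a "command") = "open_file"
    · rw [if_pos h, ih, PySem.Set.mem_add]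
      have hb : (PySem.Str.lower (pvGet a "command") == "open_file" && openTarget a == y) = true ↔ y = openTarget a := by
        simp only [Bool.and_eq_true, beq_iff_eq]
        exact ⟨fun ⟨_, e⟩ => e.symm, fun e => ⟨h, e.symm⟩⟩
      rw [hb]
      exact or_assoc
    · rw [if_neg h, ih]
      have hb : (PySem.Str.lower (pvGet a "command") == "open_file" && openTarget a == y) = false := by
        rw [beq_eq_false_iff_ne.mpr h, Bool.false_and]
      rw [hb]
      simp only [Bool.false_eq_true, false_or]

-- ===== VERDICT (by name: the statement is the Claim_ definition above) =====
theorem prepare_editor_actions_py_spec : Claim_equal_prepare_editor_actions_py := by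
  intro actions active_file _
  unfold Spec_prepare_editor_actions_py prepare_editor_actions_py prepare_editor_actions_py_alt
  simp only [altScan_needs, Bool.false_or]
  rw [altScan_first_none]
  have hpref : (if firstTargetA actions = "" then (none : Option String) else some (firstTargetA actions)).getD active_file
      = (if firstTargetA actions = "" then active_file else firstTargetA actions) := by
    by_cases h : firstTargetA actions = "" <;> simp [h]
  rw [hpref]
  set pref := if firstTargetA actions = "" then active_file else firstTargetA actions with hp
  have hopen : PySem.Set.contains (altScan actions false none PySem.Set.empty).2.2 pref = false ↔
      actions.any (fun a =>
        (PySem.Str.lower (pvGet a "command") == "open_file") && (openTarget a == pref)) = false := by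
    rw [Bool.eq_false_iff, Bool.eq_false_iff]
    constructor
    · intro h hc
      exact h (by rw [PySem.Set.contains_iff, altScan_opens_mem]; right; exact hc)
    · intro h hc
      rw [PySem.Set.contains_iff, altScan_opens_mem] at hc
      rcases hc with hc | hc
      · simp [PySem.Set.empty] at hc
      · exact h hc
  apply if_congr _ rfl rfl
  constructor
  · rintro ⟨h1, h2, h3, h4⟩; exact ⟨h1, h2, h3, hopen.2 h4⟩
  · rintro ⟨h1, h2, h3, h4⟩; exact ⟨h1, h2, h3, hopen.1 h4⟩
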